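-- pv_equiv track=rewrite | github.com/ASSERT-KTH/DET-Gen | experiments/pynguin/c4b/return-lst/generated_tests/src_540/0/src_540.py | func
-- ===== SOURCE A (Python) =====
-- def func(*args):
-- 	ret_values = []
--
-- 	s = args[0]
-- 	index = [(- 1)]
-- 	for i in range(len(s)):
-- 	    if (s[i] in 'AEIOUY'):
-- 	        index.append(i)
-- 	index.append(len(s))
-- 	g = (- 2)
-- 	for i in range(1, len(index)):
-- 	    if ((index[i] - index[(i - 1)]) > g):
-- 	        g = (index[i] - index[(i - 1)])
-- 	ret_values.append(g)
--
-- 	return ret_values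
-- ===== SOURCE B (Python) =====
-- def func(*args):
--     s = args[0]
--     prev = -1
--     g = -2
--     for i in range(len(s)):
--         if s[i] in 'AEIOUY':
--             d = i - prev
--             if d > g:
--                 g = d
--             prev = i
--     d = len(s) - prev
--     if d > g:
--         g = d
--     return [g]
-- ===== Notes on version B (the rewrite author's own statement) =====
-- stated objective: simpler
-- what changed: B drops the intermediate index list with its two sentinels and the second pass over it, keeping only a running last-vowel position and running maximum gap in one fused pass with a final end-of-string update.
import Mathlib
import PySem

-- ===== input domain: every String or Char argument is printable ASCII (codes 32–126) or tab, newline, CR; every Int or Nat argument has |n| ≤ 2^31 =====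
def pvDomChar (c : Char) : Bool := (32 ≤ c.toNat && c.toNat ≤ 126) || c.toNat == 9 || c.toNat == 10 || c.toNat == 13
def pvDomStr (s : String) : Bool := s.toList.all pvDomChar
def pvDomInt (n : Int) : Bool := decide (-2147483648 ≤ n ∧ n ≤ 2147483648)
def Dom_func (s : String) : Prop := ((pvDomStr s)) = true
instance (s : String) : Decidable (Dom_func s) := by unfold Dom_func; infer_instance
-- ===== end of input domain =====

-- B replaces A's intermediate index list (with its -1 / len(s) sentinels) and second pass
-- by a single pass keeping the last vowel position and the running maximum gap (simpler).

-- s[i] in 'AEIOUY'  (i is always in range when called; pyGet? is exact on s[i])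
def pvVowelAt (cs : List Char) (i : Int) : Bool :=
  match PySem.List.pyGet? cs i with
  | some c => decide (c ∈ ['A', 'E', 'I', 'O', 'U', 'Y'])
  | none => false

-- ===== PORT A =====
def func (s : String) : List Int :=
  let cs := s.toList
  let n : Int := (cs.length : Int)
  -- index = [-1]; for i in range(len(s)): if s[i] in 'AEIOUY': index.append(i)
  let index : List Int :=
    (PySem.List.pyRange 0 n 1).foldl
      (fun idx i => if pvVowelAt cs i then idx ++ [i] else idx) [(-1 : Int)]
  -- index.append(len(s))
  let index := index ++ [n]
  -- g = -2; for i in range(1, len(index)): if index[i] - index[i-1] > g: g = index[i] - index[i-1]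
  -- (indices i and i-1 are always in range; pyGetD _ _ 0 reads them exactly there)
  let g : Int :=
    (PySem.List.pyRange 1 (index.length : Int) 1).foldl
      (fun g i =>
        if PySem.List.pyGetD index i 0 - PySem.List.pyGetD index (i - 1) 0 > g then
          PySem.List.pyGetD index i 0 - PySem.List.pyGetD index (i - 1) 0
        else g) (-2)
  [g]

-- ===== PORT B =====
def func_alt (s : String) : List Int :=
  let cs := s.toList
  let n : Int := (cs.length : Int)
  -- prev = -1; g = -2; one pass: at each vowel update g with i - prev, then prev = i
  let st : Int × Int :=
    (PySem.List.pyRange 0 n 1).foldl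
      (fun st i =>
        if pvVowelAt cs i then (i, if i - st.1 > st.2 then i - st.1 else st.2) else st)
      ((-1 : Int), (-2 : Int))
  -- d = len(s) - prev; if d > g: g = d
  [if n - st.1 > st.2 then n - st.1 else st.2]

-- ===== PRECONDITION & SPEC =====
def Spec_func (s : String) (out : List Int) : Prop := out = func_alt s
instance (s : String) (out : List Int) : Decidable (Spec_func s out) := by unfold Spec_func; infer_instance

-- ===== CLAIM (what is proved, stated in full; the proofs are below) =====
def Claim_equal_func : Prop := ∀ (s : String), Dom_func s → Spec_func s (func s)

-- ===== LEMMAS AND PROOFS =====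

-- the common per-vowel state step: (prev, g) ↦ (x, max-style update of g with x - prev)
def pvStep (st : Int × Int) (x : Int) : Int × Int :=
  (x, if x - st.1 > st.2 then x - st.1 else st.2)

theorem pvStep_fst (l : List Int) (a g0 : Int) :
    (l.foldl pvStep (a, g0)).1 = (a :: l).getLast (by simp) := by
  induction l generalizing a g0 with
  | nil => simp
  | cons x t ih =>
      simp only [List.foldl_cons]
      rw [ih]
      cases t <;> simp [pvStep, List.getLast]

theorem pvGetD_append_left (pre suf : List Int) (i : Int) (h0 : 0 ≤ i)
    (h : i < (pre.length : Int)) :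
    PySem.List.pyGetD (pre ++ suf) i 0 = PySem.List.pyGetD pre i 0 := by
  rw [PySem.List.pyGetD_eq_getElem (pre ++ suf) 0 h0 (by simp; omega),
      PySem.List.pyGetD_eq_getElem pre 0 h0 h]
  rw [List.getElem_append_left (by omega)]

-- A's second loop over index = a :: l computes the pair-fold over l (its g component)
theorem pvLoop2 (l : List Int) (a g0 : Int) :
    (PySem.List.pyRange 1 (((a :: l).length : Int)) 1).foldl
      (fun g i =>
        if PySem.List.pyGetD (a :: l) i 0 - PySem.List.pyGetD (a :: l) (i - 1) 0 > g then
          PySem.List.pyGetD (a :: l) i 0 - PySem.List.pyGetD (a :: l) (i - 1) 0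
        else g) g0
    = (l.foldl pvStep (a, g0)).2 := by
  induction l using List.reverseRecOn generalizing g0 with
  | nil => simp [PySem.List.pyRange_one_eq_nil]
  | append_singleton t x ih =>
      simp only [← List.cons_append]
      have hlen : (((a :: t) ++ [x]).length : Int) = ((a :: t).length : Int) + 1 := by
        simp
      rw [hlen, PySem.List.pyRange_one_succ_right (by simp), List.foldl_append]
      have hc :
          (PySem.List.pyRange 1 (((a :: t).length : Int)) 1).foldl
            (fun g i =>
              if PySem.List.pyGetD ((a :: t) ++ [x]) i 0 -
                  PySem.List.pyGetD ((a :: t) ++ [x]) (i - 1) 0 > g then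
                PySem.List.pyGetD ((a :: t) ++ [x]) i 0 -
                  PySem.List.pyGetD ((a :: t) ++ [x]) (i - 1) 0
              else g) g0
          = (PySem.List.pyRange 1 (((a :: t).length : Int)) 1).foldl
            (fun g i =>
              if PySem.List.pyGetD (a :: t) i 0 - PySem.List.pyGetD (a :: t) (i - 1) 0 > g then
                PySem.List.pyGetD (a :: t) i 0 - PySem.List.pyGetD (a :: t) (i - 1) 0
              else g) g0 := by
        apply PySem.List.foldl_congr_mem
        intro acc i hi
        rw [PySem.List.mem_pyRange_one] at hi
        rw [pvGetD_append_left (a :: t) [x] i (by omega) (by omega),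
            pvGetD_append_left (a :: t) [x] (i - 1) (by omega) (by omega)]
      rw [hc, ih]
      -- last iteration: i = (a :: t).length
      have egetx : PySem.List.pyGetD ((a :: t) ++ [x]) (((a :: t).length : Int)) 0 = x := by
        rw [PySem.List.pyGetD_eq_getElem _ 0 (by positivity) (by simp)]
        simp
      have egetl : PySem.List.pyGetD ((a :: t) ++ [x]) (((a :: t).length : Int) - 1) 0
          = (a :: t).getLast (by simp) := by
        rw [pvGetD_append_left (a :: t) [x] _ (by simp) (by simp)]
        rw [PySem.List.pyGetD_eq_getElem _ 0 (by simp) (by simp)]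
        rw [List.getLast_eq_getElem]
        congr 1
        simp
      simp only [List.foldl_cons, List.foldl_nil]
      rw [egetx, egetl, List.foldl_append]
      simp only [List.foldl_cons, List.foldl_nil]
      rw [show (t.foldl pvStep (a, g0)) =
            ((t.foldl pvStep (a, g0)).1, (t.foldl pvStep (a, g0)).2) from rfl]
      simp only [pvStep, pvStep_fst]

-- ===== VERDICT (by name: the statement is the Claim_ definition above) =====
theorem func_spec : Claim_equal_func := by
  intro s _
  unfold Spec_func func func_alt
  simp only []
  set cs := s.toList with hcs
  set n : Int := (cs.length : Int) with hn
  -- A's first loop: index = -1 :: vs where vs = vowel positions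
  rw [PySem.List.foldl_append_if_eq_filter (p := pvVowelAt cs)]
  set vs : List Int := (PySem.List.pyRange 0 n 1).filter (pvVowelAt cs) with hvs
  -- B's loop: fold over vs
  rw [PySem.List.foldl_if_eq_foldl_filter (p := pvVowelAt cs)
        (f := fun (st : Int × Int) i => (i, if i - st.1 > st.2 then i - st.1 else st.2))]
  have hA := pvLoop2 (vs ++ [n]) (-1) (-2)
  simp only [List.nil_append, List.cons_append] at hA ⊢
  rw [hA, List.foldl_append]
  simp only [List.foldl_cons, List.foldl_nil]
  have hsame : (vs.foldl pvStep (-1, -2)) =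
      (vs.foldl (fun (st : Int × Int) i =>
        (i, if i - st.1 > st.2 then i - st.1 else st.2)) (-1, -2)) := by
    apply PySem.List.foldl_congr_mem
    intro acc x _
    rfl
  rw [hsame]
  set st := vs.foldl (fun (st : Int × Int) i =>
        (i, if i - st.1 > st.2 then i - st.1 else st.2)) ((-1 : Int), (-2 : Int))
  simp [pvStep]
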